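-- pv_equiv track=rewrite | github.com/hanschurer/CodingWithMinmer | 560_subarray_sum_equals_k/python/third_variant.py | find_valid_subarrays
-- ===== SOURCE A (Python) =====
-- from typing import List
--
-- def find_valid_subarrays(nums: List[int], k: int) -> List[List[int]]:
--     n = len(nums)
--     if n == 0:
--         return []
--
--     # 步骤1：计算前缀和
--     prefix = [0] * (n + 1)
--     for i in range(n):
--         prefix[i + 1] = prefix[i] + nums[i]
--
--     # 步骤2：生成所有合法长度（2的n次方，且不超过数组长度）
--     valid_lengths = []
--     current_len = 1  # 2^0 = 1
--     while current_len <= n: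
--         valid_lengths.append(current_len)
--         current_len *= 2  # 下一个2的次方
--
--     # 步骤3：遍历所有合法子数组并检查条件
--     result = []
--     for length in valid_lengths:
--         # 起始索引l的范围：0 <= l <= n - length
--         for l in range(n - length + 1):
--             r = l + length - 1  # 结束索引
--             subarray_sum = prefix[r + 1] - prefix[l]
--             if k <= subarray_sum <= 2 * k:
--                 # 记录子数组（存储元素或索引）
--                 result.append(nums[l:r+1])  # 存储元素
--                 # 若需存储索引，可改为：result.append( (l, r) )
--
--     return result
-- ===== SOURCE B (Python) =====
-- def find_valid_subarrays(nums, k):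
--     # Doubling DP: window sums of length 2L are built by pairing window sums of length L.
--     result = []
--     sums = list(nums)  # window sums of the current power-of-2 length
--     length = 1
--     while sums:
--         for l, s in enumerate(sums):
--             if k <= s <= 2 * k:
--                 result.append(nums[l:l + length])
--         sums = [sums[l] + sums[l + length] for l in range(len(sums) - length)]
--         length *= 2
--     return result
-- ===== Notes on version B (the rewrite author's own statement) =====
-- stated objective: alternative
-- what changed: Replaces A's prefix-sum array and precomputed length list with a doubling dynamic program: it keeps the array of window sums of the current power-of-2 length and builds the sums of length 2L by pairing adjacent length-L sums, collecting qualifying windows from that array each round.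
import Mathlib
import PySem

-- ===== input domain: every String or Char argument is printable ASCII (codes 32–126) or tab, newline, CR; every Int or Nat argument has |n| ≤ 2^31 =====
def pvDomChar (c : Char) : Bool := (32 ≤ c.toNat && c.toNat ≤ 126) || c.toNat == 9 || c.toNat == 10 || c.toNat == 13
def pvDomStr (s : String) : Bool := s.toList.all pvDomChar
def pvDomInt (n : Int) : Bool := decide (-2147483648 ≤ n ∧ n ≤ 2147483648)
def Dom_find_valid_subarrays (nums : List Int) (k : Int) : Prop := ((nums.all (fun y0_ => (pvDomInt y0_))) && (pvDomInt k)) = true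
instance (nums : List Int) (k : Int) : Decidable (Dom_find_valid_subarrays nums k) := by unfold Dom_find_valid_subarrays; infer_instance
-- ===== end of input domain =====

-- B replaces A's prefix-sum array and precomputed length list with a doubling DP: the array of
-- window sums of length 2L is built by pairing adjacent window sums of length L (objective: alternative).

-- ===== PORT A =====
-- the 'while current_len <= n: append; current_len *= 2' loop (fuel = n is enough: lengths double from 1)
def lengthsA (n : Nat) : Nat → Nat → List Nat
  | 0, _ => []
  | fuel+1, cur => if cur ≤ n then cur :: lengthsA n fuel (2*cur) else []

def find_valid_subarrays (nums : List Int) (k : Int) : List (List Int) :=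
  let n := nums.length
  if n = 0 then []
  else
    let pfx := (List.range n).foldl
      (fun p i => p.set (i+1) (p.getD i 0 + nums.getD i 0))
      (List.replicate (n+1) (0:Int))
    let valid_lengths := lengthsA n n 1
    valid_lengths.foldl (fun result length =>
      (List.range (n - length + 1)).foldl (fun result l =>
        let r := l + length - 1
        let subarray_sum := pfx.getD (r+1) 0 - pfx.getD l 0
        if k ≤ subarray_sum ∧ subarray_sum ≤ 2*k then
          result ++ [PySem.List.slice nums (some (l:Int)) (some ((r:Int)+1))]
        else result) result) []

-- ===== PORT B =====
-- Source B's 'while sums:' loop: the sums array for length 2L is built by pairing the length-L sums.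
-- fuel = nums.length bounds the number of doubling rounds (⌊log₂ n⌋+1 ≤ n), so the port is exact.
def bLoop (nums : List Int) (k : Int) : Nat → List Int → Nat → List (List Int) → List (List Int)
  | 0, _, _, result => result
  | fuel+1, sums, length, result =>
    if sums = [] then result
    else
      let result' := (PySem.List.enumerate sums 0).foldl (fun res ls =>
        if k ≤ ls.2 ∧ ls.2 ≤ 2*k then
          res ++ [PySem.List.slice nums (some ls.1) (some (ls.1 + (length:Int)))]
        else res) result
      let next := (List.range (sums.length - length)).map
        (fun l => sums.getD l 0 + sums.getD (l+length) 0)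
      bLoop nums k fuel next (2*length) result'

def find_valid_subarrays_alt (nums : List Int) (k : Int) : List (List Int) :=
  bLoop nums k nums.length nums 1 []

-- ===== PRECONDITION & SPEC =====
def Spec_find_valid_subarrays (nums : List Int) (k : Int) (out : List (List Int)) : Prop := out = find_valid_subarrays_alt nums k
instance (nums : List Int) (k : Int) (out : List (List Int)) : Decidable (Spec_find_valid_subarrays nums k out) := by unfold Spec_find_valid_subarrays; infer_instance

-- ===== CLAIM (what is proved, stated in full; the proofs are below) =====
def Claim_equal_find_valid_subarrays : Prop := ∀ (nums : List Int) (k : Int), Dom_find_valid_subarrays nums k → Spec_find_valid_subarrays nums k (find_valid_subarrays nums k)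

-- ===== LEMMAS AND PROOFS =====

lemma lengthsA_mem {n fuel cur len : Nat} (h : len ∈ lengthsA n fuel cur) :
    cur ≤ len ∧ len ≤ n := by
  induction fuel generalizing cur with
  | zero => simp [lengthsA] at h
  | succ fuel ih =>
    unfold lengthsA at h
    by_cases hc : cur ≤ n
    · rw [if_pos hc] at h
      rcases List.mem_cons.mp h with h | h
      · omega
      · have := ih h; omega
    · rw [if_neg hc] at h; simp at h

-- sum of the window of length `len` starting at `l`
def Ssum (nums : List Int) (l len : Nat) : Int := ((nums.drop l).take len).sum

-- the items both loops append for a given length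
def innerF (nums : List Int) (k : Int) (len n : Nat) : List (List Int) :=
  (List.range (n - len + 1)).filterMap (fun l =>
    if k ≤ Ssum nums l len ∧ Ssum nums l len ≤ 2*k
    then some ((nums.drop l).take len) else none)

lemma slice_nat (nums : List Int) (a b : Nat) :
    PySem.List.slice nums (some (a:Int)) (some (b:Int)) = (nums.drop a).take (b - a) := by
  rw [PySem.List.slice_toNat nums (by positivity) (by positivity)]
  simp

lemma take_sum_succ (nums : List Int) (i : Nat) (h : i < nums.length) :
    (nums.take (i+1)).sum = (nums.take i).sum + nums.getD i 0 := by
  rw [List.take_add_one, List.getElem?_eq_getElem h, Option.toList_some, List.sum_append,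
    List.sum_cons, List.sum_nil, List.getD_eq_getElem nums 0 h, add_zero]

lemma Ssum_diff (nums : List Int) (l len : Nat) :
    (nums.take (l+len)).sum - (nums.take l).sum = Ssum nums l len := by
  rw [List.take_add]
  simp [Ssum]

-- window sums combine: S(l, a) + S(l+a, b) = S(l, a+b)
lemma Ssum_add (nums : List Int) (l a b : Nat) :
    Ssum nums l a + Ssum nums (l+a) b = Ssum nums l (a+b) := by
  have h1 := Ssum_diff nums l a
  have h2 := Ssum_diff nums (l+a) b
  have h3 := Ssum_diff nums l (a+b)
  have e : l + a + b = l + (a + b) := by omega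
  rw [e] at h2
  omega

-- characterization of A's prefix array
lemma prefix_char (nums : List Int) (m : Nat) (hm : m ≤ nums.length) :
    (List.range m).foldl (fun p i => p.set (i+1) (p.getD i 0 + nums.getD i 0))
      (List.replicate (nums.length+1) (0:Int))
    = (List.range (nums.length+1)).map (fun j => if j ≤ m then (nums.take j).sum else 0) := by
  induction m with
  | zero =>
    rw [List.range_zero, List.foldl_nil]
    apply List.ext_getElem
    · simp
    · intro j hj hj'
      simp only [List.length_replicate] at hj
      rw [List.getElem_replicate, List.getElem_map, List.getElem_range]
      rcases Nat.eq_zero_or_pos j with h0 | h0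
      · subst h0; simp
      · rw [if_neg (by omega)]
  | succ m ih =>
    rw [List.range_succ, List.foldl_append, ih (by omega)]
    simp only [List.foldl_cons, List.foldl_nil]
    have hget : ((List.range (nums.length+1)).map
        (fun j => if j ≤ m then (nums.take j).sum else 0)).getD m 0 = (nums.take m).sum := by
      rw [List.getD_eq_getElem?_getD]
      rw [List.getElem?_map, List.getElem?_range (by omega)]
      simp
    rw [hget]
    apply List.ext_getElem
    · simp
    · intro j hj hj'
      simp only [List.length_set, List.length_map, List.length_range] at hj
      simp only [List.getElem_set, List.getElem_map, List.getElem_range]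
      by_cases hjm : m + 1 = j
      · subst hjm
        rw [if_pos rfl, if_pos (le_refl _), take_sum_succ nums m (by omega)]
      · rw [if_neg hjm]
        by_cases h1 : j ≤ m
        · rw [if_pos h1, if_pos (by omega)]
        · rw [if_neg h1, if_neg (by omega)]

lemma prefix_getD (nums : List Int) (j : Nat) (hj : j ≤ nums.length) :
    ((List.range nums.length).foldl (fun p i => p.set (i+1) (p.getD i 0 + nums.getD i 0))
      (List.replicate (nums.length+1) (0:Int))).getD j 0 = (nums.take j).sum := by
  rw [prefix_char nums nums.length (le_refl _)]
  rw [List.getD_eq_getElem?_getD, List.getElem?_map, List.getElem?_range (by omega)]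
  simp [hj]

-- A's inner loop produces innerF
lemma A_inner (nums : List Int) (k : Int) (len : Nat) (h1 : 1 ≤ len) :
    ∀ (L : List Nat) (res : List (List Int)), (∀ l ∈ L, l + len ≤ nums.length) →
    L.foldl (fun result l =>
        let r := l + len - 1
        let subarray_sum :=
          ((List.range nums.length).foldl (fun p i => p.set (i+1) (p.getD i 0 + nums.getD i 0))
            (List.replicate (nums.length+1) (0:Int))).getD (r+1) 0 -
          ((List.range nums.length).foldl (fun p i => p.set (i+1) (p.getD i 0 + nums.getD i 0))
            (List.replicate (nums.length+1) (0:Int))).getD l 0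
        if k ≤ subarray_sum ∧ subarray_sum ≤ 2*k then
          result ++ [PySem.List.slice nums (some (l:Int)) (some ((r:Int)+1))]
        else result) res
    = res ++ L.filterMap (fun l =>
        if k ≤ Ssum nums l len ∧ Ssum nums l len ≤ 2*k
        then some ((nums.drop l).take len) else none) := by
  intro L
  induction L with
  | nil => intro res _; simp
  | cons a L ih =>
    intro res hmem
    have ha : a + len ≤ nums.length := hmem a (List.mem_cons_self ..)
    have hr1 : a + len - 1 + 1 = a + len := by omega
    simp only [List.foldl_cons, List.filterMap_cons]
    rw [hr1, prefix_getD nums (a+len) ha, prefix_getD nums a (by omega)]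
    rw [Ssum_diff nums a len]
    have hsl : PySem.List.slice nums (some (a:Int)) (some ((((a + len - 1 : Nat)):Int)+1))
        = (nums.drop a).take len := by
      have : (((a + len - 1 : Nat)):Int) + 1 = ((a + len : Nat) : Int) := by push_cast; omega
      rw [this, slice_nat]
      congr 1; omega
    rw [hsl]
    by_cases hc : k ≤ Ssum nums a len ∧ Ssum nums a len ≤ 2*k
    · rw [if_pos hc, if_pos hc, ih _ (fun l hl => hmem l (List.mem_cons_of_mem _ hl)),
        List.append_assoc]
      rfl
    · rw [if_neg hc, if_neg hc, ih _ (fun l hl => hmem l (List.mem_cons_of_mem _ hl))]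

-- B's per-length enumerate loop over the sums array produces innerF's filterMap over range m
lemma B_enum (nums : List Int) (k : Int) (len : Nat) :
    ∀ (m : Nat) (res : List (List Int)),
    (PySem.List.enumerate ((List.range m).map (fun l => Ssum nums l len)) 0).foldl
      (fun res ls =>
        if k ≤ ls.2 ∧ ls.2 ≤ 2*k then
          res ++ [PySem.List.slice nums (some ls.1) (some (ls.1 + (len:Int)))]
        else res) res
    = res ++ (List.range m).filterMap (fun l =>
        if k ≤ Ssum nums l len ∧ Ssum nums l len ≤ 2*k
        then some ((nums.drop l).take len) else none) := by
  intro m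
  induction m with
  | zero => intro res; simp [PySem.List.enumerate_nil]
  | succ m ih =>
    intro res
    rw [List.range_succ, List.map_append, PySem.List.enumerate_append, List.foldl_append, ih]
    simp only [List.map_cons, List.map_nil, List.length_map, List.length_range,
      PySem.List.enumerate_cons, PySem.List.enumerate_nil, List.foldl_cons, List.foldl_nil,
      List.filterMap_append, List.filterMap_cons, List.filterMap_nil]
    have hsl : PySem.List.slice nums (some ((m:Nat):Int))
        (some (((m:Nat):Int) + (len:Int))) = (nums.drop m).take len := by
      have e2 : ((m:Nat):Int) + (len:Int) = ((m + len : Nat) : Int) := by push_cast; ring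
      rw [e2, slice_nat]
      congr 1; omega
    simp only [zero_add]
    by_cases hc : k ≤ Ssum nums m len ∧ Ssum nums m len ≤ 2*k
    · rw [if_pos hc, if_pos hc, hsl]
      simp [List.append_assoc]
    · rw [if_neg hc, if_neg hc]
      simp

lemma map_range_getD (m : Nat) (f : Nat → Int) (l : Nat) (hl : l < m) :
    (((List.range m).map f).getD l 0) = f l := by
  rw [List.getD_eq_getElem?_getD, List.getElem?_map, List.getElem?_range hl]
  simp

-- combining adjacent length-`cur` window sums yields the length-`2*cur` window sums
lemma B_next (nums : List Int) (cur : Nat) :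
    (List.range (((List.range (nums.length + 1 - cur)).map
        (fun l => Ssum nums l cur)).length - cur)).map
      (fun l => ((List.range (nums.length + 1 - cur)).map (fun l => Ssum nums l cur)).getD l 0 +
        ((List.range (nums.length + 1 - cur)).map (fun l => Ssum nums l cur)).getD (l+cur) 0)
    = (List.range (nums.length + 1 - 2*cur)).map (fun l => Ssum nums l (2*cur)) := by
  rw [List.length_map, List.length_range]
  have e : nums.length + 1 - cur - cur = nums.length + 1 - 2*cur := by omega
  rw [e]
  apply List.map_congr_left
  intro l hl
  have hl' := List.mem_range.mp hl
  rw [map_range_getD _ _ l (by omega), map_range_getD _ _ (l+cur) (by omega)]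
  have := Ssum_add nums l cur cur
  rw [this]
  congr 1; omega

-- B's doubling loop flattens innerF over the same length list A builds (same fuel)
lemma B_loop (nums : List Int) (k : Int) :
    ∀ (fuel cur : Nat), 1 ≤ cur → ∀ (res : List (List Int)),
    bLoop nums k fuel ((List.range (nums.length + 1 - cur)).map (fun l => Ssum nums l cur)) cur res
    = res ++ (lengthsA nums.length fuel cur).flatMap
        (fun len => innerF nums k len nums.length) := by
  intro fuel
  induction fuel with
  | zero => intro cur _ res; simp [bLoop, lengthsA]
  | succ fuel ih =>
    intro cur hcur res
    unfold bLoop lengthsA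
    by_cases h : cur ≤ nums.length
    · have hne : (List.range (nums.length + 1 - cur)).map (fun l => Ssum nums l cur) ≠ [] := by
        simp only [ne_eq, List.map_eq_nil_iff, List.range_eq_nil]
        omega
      rw [if_neg hne, if_pos h]
      simp only
      rw [B_enum nums k cur (nums.length + 1 - cur) res, B_next nums cur,
        ih (2*cur) (by omega)]
      have einner : innerF nums k cur nums.length
          = (List.range (nums.length + 1 - cur)).filterMap (fun l =>
              if k ≤ Ssum nums l cur ∧ Ssum nums l cur ≤ 2*k
              then some ((nums.drop l).take cur) else none) := by
        unfold innerF
        have e2 : nums.length - cur + 1 = nums.length + 1 - cur := by omega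
        rw [e2]
      rw [← einner]
      simp [List.flatMap_cons, List.append_assoc]
    · have hni : nums.length + 1 - cur = 0 := by omega
      have hnil : (List.range (nums.length + 1 - cur)).map (fun l => Ssum nums l cur) = [] := by
        rw [hni]; simp
      rw [if_pos hnil, if_neg h]
      simp

-- the initial sums array is nums itself (window sums of length 1)
lemma sums_one (nums : List Int) :
    (List.range (nums.length + 1 - 1)).map (fun l => Ssum nums l 1) = nums := by
  have e : nums.length + 1 - 1 = nums.length := by omega
  rw [e]
  apply List.ext_getElem
  · simp
  · intro j hj hj'
    simp only [List.length_map, List.length_range] at hj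
    rw [List.getElem_map, List.getElem_range]
    unfold Ssum
    rw [List.drop_eq_getElem_cons (by omega), List.take_succ_cons, List.take_zero]
    simp

-- ===== VERDICT (by name: the statement is the Claim_ definition above) =====
theorem find_valid_subarrays_spec : Claim_equal_find_valid_subarrays := by
  intro nums k _
  unfold Spec_find_valid_subarrays find_valid_subarrays find_valid_subarrays_alt
  have hB := B_loop nums k nums.length 1 (by omega) []
  rw [sums_one nums, List.nil_append] at hB
  rw [hB]
  by_cases hn : nums.length = 0
  · rw [if_pos hn, hn]
    simp [lengthsA]
  · rw [if_neg hn]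
    simp only []
    have h2 : List.foldl (fun (res : List (List Int)) len => res ++ innerF nums k len nums.length)
        [] (lengthsA nums.length nums.length 1)
        = List.flatMap (fun len => innerF nums k len nums.length)
            (lengthsA nums.length nums.length 1) := by
      rw [PySem.List.foldl_append_eq_flatMap, List.nil_append]
    rw [← h2]
    apply PySem.List.foldl_congr_mem
    intro acc len hlen
    obtain ⟨hb1, hb2⟩ := lengthsA_mem hlen
    have hA := A_inner nums k len hb1 (List.range (nums.length - len + 1)) acc
      (fun l hl => by have := List.mem_range.mp hl; omega)
    rw [hA]
    rfl
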